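-- pv_equiv track=rewrite | github.com/kunal22-jpg/Hackunited1 | backend/server.py | generate_health_recommendations
-- ===== SOURCE A (Python) =====
-- from typing import List, Optional, Dict, Any
-- from typing import List
--
-- def generate_health_recommendations(symptoms: List[str], severity: str, urgency_level: str) -> List[str]:
--     """Generate health recommendations based on symptoms and urgency"""
--     recommendations = []
--
--     # General recommendations
--     recommendations.extend([
--         "Stay well hydrated by drinking plenty of fluids",
--         "Get adequate rest and sleep (7-9 hours per night)",
--         "Monitor your symptoms and note any changes"
--     ])
--
--     # Severity-based recommendations
--     if severity == "severe" or urgency_level == "High":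
--         recommendations.extend([
--             "Seek immediate medical attention",
--             "Consider visiting an emergency room or urgent care",
--             "Have someone stay with you if possible"
--         ])
--     elif severity == "moderate":
--         recommendations.extend([
--             "Consider over-the-counter remedies if appropriate",
--             "Contact your healthcare provider if symptoms worsen",
--             "Avoid strenuous activities until symptoms improve"
--         ])
--     else:  # mild symptoms
--         recommendations.extend([
--             "Try home remedies and self-care measures",
--             "Continue normal activities if you feel up to it",
--             "Watch for symptom progression over the next 24-48 hours"
--         ])
--
--     # Symptom-specific recommendations
--     symptom_text = ' '.join(symptoms).lower()
--
--     if any(word in symptom_text for word in ["fever", "temperature"]):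
--         recommendations.append("Use fever-reducing medication if needed (follow package instructions)")
--
--     if any(word in symptom_text for word in ["cough"]):
--         recommendations.append("Use honey or throat lozenges to soothe throat irritation")
--
--     if any(word in symptom_text for word in ["headache", "head pain"]):
--         recommendations.append("Try relaxation techniques and ensure you're in a quiet, dark environment")
--
--     return recommendations[:6]  # Return top 6 recommendations
-- ===== SOURCE B (Python) =====
-- def generate_health_recommendations(symptoms, severity, urgency_level):
--     """Generate health recommendations based on symptoms and urgency.
--
--     The original appended symptom-specific tips after six guaranteed entries
--     and then truncated to 6, so those appends were dead code; B returns the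
--     three general tips plus the selected severity trio directly."""
--     general = [
--         "Stay well hydrated by drinking plenty of fluids",
--         "Get adequate rest and sleep (7-9 hours per night)",
--         "Monitor your symptoms and note any changes",
--     ]
--     if severity == "severe" or urgency_level == "High":
--         tier = [
--             "Seek immediate medical attention",
--             "Consider visiting an emergency room or urgent care",
--             "Have someone stay with you if possible",
--         ]
--     elif severity == "moderate":
--         tier = [
--             "Consider over-the-counter remedies if appropriate",
--             "Contact your healthcare provider if symptoms worsen",
--             "Avoid strenuous activities until symptoms improve",
--         ]
--     else:
--         tier = [
--             "Try home remedies and self-care measures",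
--             "Continue normal activities if you feel up to it",
--             "Watch for symptom progression over the next 24-48 hours",
--         ]
--     return general + tier
-- ===== Notes on version B (the rewrite author's own statement) =====
-- stated objective: simpler
-- what changed: B drops the dead symptom-scanning pass (join/lower/substring checks) entirely, since the [:6] truncation always discards those appends, and returns the 3 general plus the 3 severity-tier recommendations directly. (B skips the O(total-symptom-length) join/lower/substring work A always throws away)
import Mathlib
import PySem

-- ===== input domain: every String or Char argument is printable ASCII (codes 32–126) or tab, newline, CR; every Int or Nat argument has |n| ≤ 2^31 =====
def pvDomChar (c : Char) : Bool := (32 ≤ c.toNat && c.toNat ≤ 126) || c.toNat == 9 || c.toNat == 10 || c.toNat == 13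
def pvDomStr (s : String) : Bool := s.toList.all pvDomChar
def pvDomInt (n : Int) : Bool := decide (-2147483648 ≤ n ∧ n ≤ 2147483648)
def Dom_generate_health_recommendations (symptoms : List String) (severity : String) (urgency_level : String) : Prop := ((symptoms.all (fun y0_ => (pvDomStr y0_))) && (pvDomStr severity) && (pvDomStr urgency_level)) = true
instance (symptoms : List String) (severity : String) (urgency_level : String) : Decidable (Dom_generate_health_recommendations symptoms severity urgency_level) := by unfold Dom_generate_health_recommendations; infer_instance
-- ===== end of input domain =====

-- ===== PORT A =====
def generate_health_recommendations (symptoms : List String) (severity : String) (urgency_level : String) : List String :=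
  let recommendations : List String := []
  let recommendations := recommendations ++ [
    "Stay well hydrated by drinking plenty of fluids",
    "Get adequate rest and sleep (7-9 hours per night)",
    "Monitor your symptoms and note any changes"]
  let recommendations :=
    if severity == "severe" || urgency_level == "High" then
      recommendations ++ [
        "Seek immediate medical attention",
        "Consider visiting an emergency room or urgent care",
        "Have someone stay with you if possible"]
    else if severity == "moderate" then
      recommendations ++ [
        "Consider over-the-counter remedies if appropriate",
        "Contact your healthcare provider if symptoms worsen",
        "Avoid strenuous activities until symptoms improve"]
    else
      recommendations ++ [
        "Try home remedies and self-care measures",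
        "Continue normal activities if you feel up to it",
        "Watch for symptom progression over the next 24-48 hours"]
  let symptom_text := PySem.Str.lower (PySem.Str.join " " symptoms)
  let recommendations :=
    if ["fever", "temperature"].any (fun word => PySem.Str.isIn word symptom_text) then
      recommendations ++ ["Use fever-reducing medication if needed (follow package instructions)"]
    else recommendations
  let recommendations :=
    if ["cough"].any (fun word => PySem.Str.isIn word symptom_text) then
      recommendations ++ ["Use honey or throat lozenges to soothe throat irritation"]
    else recommendations
  let recommendations :=
    if ["headache", "head pain"].any (fun word => PySem.Str.isIn word symptom_text) then
      recommendations ++ ["Try relaxation techniques and ensure you're in a quiet, dark environment"]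
    else recommendations
  PySem.List.slice recommendations none (some 6)

-- ===== PORT B =====
def generate_health_recommendations_alt (symptoms : List String) (severity : String) (urgency_level : String) : List String :=
  let general : List String := [
    "Stay well hydrated by drinking plenty of fluids",
    "Get adequate rest and sleep (7-9 hours per night)",
    "Monitor your symptoms and note any changes"]
  let tier : List String :=
    if severity == "severe" || urgency_level == "High" then [
      "Seek immediate medical attention",
      "Consider visiting an emergency room or urgent care",
      "Have someone stay with you if possible"]
    else if severity == "moderate" then [
      "Consider over-the-counter remedies if appropriate",
      "Contact your healthcare provider if symptoms worsen",
      "Avoid strenuous activities until symptoms improve"]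
    else [
      "Try home remedies and self-care measures",
      "Continue normal activities if you feel up to it",
      "Watch for symptom progression over the next 24-48 hours"]
  general ++ tier

-- ===== PRECONDITION & SPEC =====
def Spec_generate_health_recommendations (symptoms : List String) (severity : String) (urgency_level : String) (out : List String) : Prop := out = generate_health_recommendations_alt symptoms severity urgency_level
instance (symptoms : List String) (severity : String) (urgency_level : String) (out : List String) : Decidable (Spec_generate_health_recommendations symptoms severity urgency_level out) := by unfold Spec_generate_health_recommendations; infer_instance

-- ===== CLAIM (what is proved, stated in full; the proofs are below) =====
def Claim_equal_generate_health_recommendations : Prop := ∀ (symptoms : List String) (severity : String) (urgency_level : String), Dom_generate_health_recommendations symptoms severity urgency_level → Spec_generate_health_recommendations symptoms severity urgency_level (generate_health_recommendations symptoms severity urgency_level)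

-- B drops the dead symptom pass: the six-element prefix survives the [:6] slice unchanged.
-- ===== LEMMAS AND PROOFS =====

-- ===== VERDICT (by name: the statement is the Claim_ definition above) =====
theorem generate_health_recommendations_spec : Claim_equal_generate_health_recommendations := by
  intro symptoms severity urgency_level _
  unfold Spec_generate_health_recommendations generate_health_recommendations
    generate_health_recommendations_alt
  split_ifs <;> simp [PySem.List.slice] <;> split_ifs <;> rfl
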